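-- pv_equiv track=rewrite | github.com/psg759/Baekjoon | 프로그래머스/1/135808. 과일 장수/과일 장수.py | solution
-- ===== SOURCE A (Python) =====
-- def solution(k, m, score):
--     answer = []
--     price = 0
--     score = sorted(score, reverse=True)
--
--     for i in range(len(score)):
--         answer.append(score[i])
--         if len(answer) == m:
--             price += min(answer) * m
--             answer = []
--
--     return price
-- ===== SOURCE B (Python) =====
-- def solution(k, m, score):
--     s = sorted(score, reverse=True)
--     # each complete basket's minimum is its last element in descending order:
--     # element at index j*m + m - 1 for basket j
--     return m * sum(s[j * m + m - 1] for j in range(len(s) // m))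
-- ===== Notes on version B (the rewrite author's own statement) =====
-- stated objective: simpler
-- what changed: Instead of accumulating elements into a buffer and taking min when it fills, B computes the basket count len(score)//m and directly sums every m-th element of the descending-sorted list (each basket's minimum), multiplying the sum by m once.
-- outside the precondition, e.g. on solution(1, 0, [1, 2]): A returns 0, B raises ZeroDivisionError
import Mathlib
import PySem

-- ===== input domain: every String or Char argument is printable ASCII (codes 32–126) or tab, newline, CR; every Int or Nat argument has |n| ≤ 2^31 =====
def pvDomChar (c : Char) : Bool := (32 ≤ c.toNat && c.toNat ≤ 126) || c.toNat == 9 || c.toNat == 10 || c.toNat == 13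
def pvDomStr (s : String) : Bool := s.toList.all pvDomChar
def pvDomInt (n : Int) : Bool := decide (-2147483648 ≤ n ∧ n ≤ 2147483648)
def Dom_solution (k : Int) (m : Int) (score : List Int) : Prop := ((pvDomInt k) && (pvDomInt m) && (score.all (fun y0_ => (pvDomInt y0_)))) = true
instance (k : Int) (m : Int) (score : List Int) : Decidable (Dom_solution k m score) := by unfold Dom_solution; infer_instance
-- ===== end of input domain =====

-- B replaces A's buffer-filling loop with direct summation of every m-th element
-- of the descending-sorted list (each complete basket's minimum); simpler decomposition,
-- equal on all inputs with m ≠ 0 (Pre_ excludes m = 0, where A returns and B raises).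


-- ===== PORT A =====
-- one loop iteration of A: append score[i] to answer; when the buffer reaches m, add min*m and clear
def stepA (m : Int) (st : List Int × Int) (x : Int) : List Int × Int :=
  let answer := st.1 ++ [x]
  if (answer.length : Int) = m then
    ([], st.2 + (PySem.List.min? answer (fun y => y)).getD 0 * m)
  else (answer, st.2)

def solution (k : Int) (m : Int) (score : List Int) : Int :=
  let score2 := PySem.List.sorted score (fun y => y) true
  ((PySem.List.pyRange 0 (score2.length : Int) 1).foldl
    (fun st i => stepA m st (PySem.List.pyGetD score2 i 0)) ([], 0)).2

-- ===== PORT B =====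
def solution_alt (k : Int) (m : Int) (score : List Int) : Int :=
  let s := PySem.List.sorted score (fun y => y) true
  m * (PySem.List.pyRange 0 (PySem.Int.floordiv (s.length : Int) m) 1).foldl
      (fun acc j => acc + PySem.List.pyGetD s (j * m + m - 1) 0) 0

-- ===== PRECONDITION & SPEC =====
-- Pre_ excludes exactly m = 0, where A returns 0 but B's len(score)//m raises ZeroDivisionError.
def Pre_solution (k : Int) (m : Int) (score : List Int) : Prop := m ≠ 0
instance (k : Int) (m : Int) (score : List Int) : Decidable (Pre_solution k m score) := by unfold Pre_solution; infer_instance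
def pvWitness_solution : Int × Int × List Int := (0, 2, [3, 1, 2, 5])

def Spec_solution (k : Int) (m : Int) (score : List Int) (out : Int) : Prop := out = solution_alt k m score
instance (k : Int) (m : Int) (score : List Int) (out : Int) : Decidable (Spec_solution k m score out) := by unfold Spec_solution; infer_instance

-- ===== CLAIM (what is proved, stated in full; the proofs are below) =====
def Claim_equal_solution : Prop := ∀ (k : Int) (m : Int) (score : List Int), Dom_solution k m score → Pre_solution k m score → Spec_solution k m score (solution k m score)

-- ===== LEMMAS AND PROOFS =====

-- B's per-basket sum, on an arbitrary list
def bsum (m : Int) (t : List Int) : Int :=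
  (PySem.List.pyRange 0 (PySem.Int.floordiv (t.length : Int) m) 1).foldl
    (fun acc j => acc + PySem.List.pyGetD t (j * m + m - 1) 0) 0

theorem foldl_add_f (f : Int → Int) (l : List Int) (init : Int) :
    l.foldl (fun acc j => acc + f j) init = init + (l.map f).sum := by
  induction l generalizing init with
  | nil => simp
  | cons x t ih => simp [List.foldl_cons, ih (init + f x)]; ring

-- A's loop never fires when the buffer plus the remaining input is shorter than m
theorem stepA_small (m : Int) (t : List Int) (a : List Int) (p : Int)
    (h : (a.length : Int) + t.length < m) :
    (t.foldl (stepA m) (a, p)).2 = p := by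
  induction t generalizing a p with
  | nil => simp
  | cons x tl ih =>
    have hne : ((a.length : Int) + 1) ≠ m := by
      simp at h; omega
    simp only [List.foldl_cons, stepA]
    rw [if_neg (by simpa using hne)]
    exact ih (a ++ [x]) p (by simp at h ⊢; omega)

-- processing exactly one basket's worth of elements clears the buffer and adds min*m
theorem stepA_chunk (m : Int) (chunk : List Int) (a : List Int) (p : Int)
    (hne : chunk ≠ []) (hlen : (a.length : Int) + chunk.length = m) :
    chunk.foldl (stepA m) (a, p) =
      ([], p + (PySem.List.min? (a ++ chunk) (fun y => y)).getD 0 * m) := by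
  induction chunk generalizing a p with
  | nil => exact absurd rfl hne
  | cons x tl ih =>
    cases tl with
    | nil =>
      simp only [List.foldl_cons, stepA, List.foldl_nil]
      rw [if_pos (by simp at hlen ⊢; omega)]
    | cons y rest =>
      have h1 : stepA m (a, p) x = (a ++ [x], p) := by
        simp only [stepA]
        split_ifs with h
        · exfalso; simp at h hlen; omega
        · rfl
      rw [List.foldl_cons, h1, ih (a ++ [x]) p (by simp) (by simp at hlen ⊢; omega)]
      simp

-- in a descending list, the minimum of the first m' elements is the element at index m'-1
theorem min_take_desc (t : List Int) (hp : t.Pairwise (fun a b => b ≤ a))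
    (m' : Nat) (h1 : 1 ≤ m') (h2 : m' ≤ t.length) :
    (PySem.List.min? (t.take m') (fun y => y)).getD 0 = t[m' - 1] := by
  set ch : List Int := t.take m' with hc
  have hclen : ch.length = m' := by simp [hc]; omega
  have hcp : ch.Pairwise (fun a b => b ≤ a) := hp.sublist (List.take_sublist _ _)
  have hml : m' - 1 < t.length := by omega
  have hml' : m' - 1 < ch.length := by omega
  have hlast : ch[m' - 1] = t[m' - 1] := by
    simp [hc, List.getElem_take]
  obtain ⟨w, hw⟩ : ∃ w, PySem.List.min? ch (fun y => y) = some w := by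
    cases h : PySem.List.min? ch (fun y => y) with
    | none =>
      rw [PySem.List.min?_eq_none_iff] at h
      rw [h] at hclen; simp at hclen; omega
    | some w => exact ⟨w, rfl⟩
  have hwmem := PySem.List.min?_mem hw
  have hwmin := PySem.List.min?_isMin hw
  have hmono : ∀ i (hi : i < ch.length), ch[m' - 1] ≤ ch[i] := by
    intro i hi
    rcases lt_trichotomy i (m' - 1) with h | h | h
    · exact (List.pairwise_iff_getElem.mp hcp) i (m' - 1) (by omega) (by omega) h
    · simp [h]
    · omega
  obtain ⟨i, hi, hieq⟩ := List.mem_iff_getElem.mp hwmem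
  have ha : w ≤ ch[m' - 1] := hwmin _ (List.getElem_mem _)
  have hb : ch[m' - 1] ≤ w := by rw [← hieq]; exact hmono i hi
  rw [hw]
  simp only [Option.getD_some]
  rw [← hlast]
  omega

-- bsum is zero on lists shorter than m
theorem bsum_small (m : Int) (hm : 1 ≤ m) (t : List Int) (h : (t.length : Int) < m) :
    bsum m t = 0 := by
  have hq : PySem.Int.floordiv (t.length : Int) m = 0 := by
    rw [PySem.Int.floordiv_eq_iff_of_pos (by omega)]
    constructor <;> omega
  unfold bsum
  rw [hq, PySem.List.pyRange_one_eq_nil (le_refl 0)]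
  rfl

-- peel one basket off bsum
theorem bsum_peel (m : Int) (hm : 1 ≤ m) (t : List Int) (h : m ≤ (t.length : Int)) :
    bsum m t = PySem.List.pyGetD t (m - 1) 0 + bsum m (t.drop m.toNat) := by
  set n : Int := (t.length : Int) with hn
  set q : Int := PySem.Int.floordiv n m with hqdef
  have hm0 : (0:Int) < m := by omega
  have hq1 : 1 ≤ q := by
    rw [hqdef, PySem.Int.le_floordiv_iff_mul_le hm0]
    omega
  have hqm : q * m ≤ n := (PySem.Int.le_floordiv_iff_mul_le hm0).mp (le_of_eq hqdef)
  have hqm2 : n < (q + 1) * m := ((PySem.Int.floordiv_eq_iff_of_pos hm0).mp hqdef.symm).2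
  have hdl : ((t.drop m.toNat).length : Int) = n - m := by
    simp [List.length_drop, hn]; omega
  have hq2 : PySem.Int.floordiv ((t.drop m.toNat).length : Int) m = q - 1 := by
    rw [PySem.Int.floordiv_eq_iff_of_pos hm0, hdl]
    have e1 : (q - 1) * m = q * m - m := by ring
    have e2 : q * m = (q + 1) * m - m := by ring
    have e3 : (q - 1 + 1) * m = q * m := by ring
    constructor <;> omega
  unfold bsum
  rw [hq2]
  rw [show PySem.Int.floordiv (t.length : Int) m = q from hqdef.symm]
  rw [PySem.List.pyRange_one_cons (show (0:Int) < q by omega), List.foldl_cons,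
    show (0:Int) + 1 = 1 from by norm_num]
  rw [foldl_add_f (fun j => PySem.List.pyGetD t (j * m + m - 1) 0)]
  rw [foldl_add_f (fun j => PySem.List.pyGetD (t.drop m.toNat) (j * m + m - 1) 0)]
  have hzero : (0:Int) * m + m - 1 = m - 1 := by ring
  rw [hzero]
  have hsum : ((PySem.List.pyRange 1 q).map (fun j => PySem.List.pyGetD t (j * m + m - 1) 0)).sum
      = ((PySem.List.pyRange 0 (q - 1)).map (fun j => PySem.List.pyGetD (t.drop m.toNat) (j * m + m - 1) 0)).sum := by
    rw [PySem.List.pyRange_one 1 q, PySem.List.pyRange_one 0 (q - 1)]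
    rw [List.map_map, List.map_map]
    have hr : (q - 1 - 0).toNat = (q - 1).toNat := by omega
    rw [hr]
    apply congrArg List.sum
    apply List.map_congr_left
    intro kk hk
    rw [List.mem_range] at hk
    have hkq : (kk : Int) ≤ q - 2 := by omega
    simp only [Function.comp]
    have hb1 : ((1:Int) + kk) * m ≤ (q - 1) * m :=
      mul_le_mul_of_nonneg_right (by omega) (by omega)
    have eq1 : (q - 1) * m = q * m - m := by ring
    have hi1 : (1 + (kk:Int)) * m + m - 1 < n := by linarith
    have hi1n : (0:Int) ≤ (1 + kk) * m + m - 1 := by nlinarith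
    have hi2n : (0:Int) ≤ (0 + kk) * m + m - 1 := by nlinarith
    have hi2 : (0 + (kk:Int)) * m + m - 1 < ((t.drop m.toNat).length : Int) := by
      have e3 : ((0:Int) + kk) * m = (1 + kk) * m - m := by ring
      linarith
    rw [PySem.List.pyGetD_eq_getElem t 0 hi1n (by omega)]
    rw [PySem.List.pyGetD_eq_getElem (t.drop m.toNat) 0 hi2n hi2]
    rw [List.getElem_drop]
    have e4 : (1 + (kk:Int)) * m + m - 1 = m + ((0 + kk) * m + m - 1) := by ring
    congr 1
    rw [e4, Int.toNat_add (by omega) hi2n]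
  rw [hsum]
  ring

theorem main_lemma (m : Int) (hm : 1 ≤ m) : ∀ n (t : List Int), t.length = n →
    t.Pairwise (fun a b => b ≤ a) → ∀ p,
    (t.foldl (stepA m) ([], p)).2 = p + m * bsum m t := by
  intro n
  induction n using Nat.strong_induction_on with
  | _ n ih =>
    intro t hn hp p
    subst hn
    by_cases hlen : (t.length : Int) < m
    · rw [stepA_small m t [] p (by simpa using hlen), bsum_small m hm t hlen]
      ring
    · push_neg at hlen
      have hm' : m.toNat ≤ t.length := by omega
      have h1 : 1 ≤ m.toNat := by omega
      have hsplit := List.take_append_drop m.toNat t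
      have hchunk := stepA_chunk m (t.take m.toNat) [] p
        (by intro hh; have := congrArg List.length hh
            simp only [List.length_take, List.length_nil] at this; omega)
        (by simp only [List.length_nil, List.length_take]; push_cast; omega)
      rw [← hsplit, List.foldl_append, hsplit, hchunk]
      have hdp : (t.drop m.toNat).Pairwise (fun a b => b ≤ a) :=
        hp.sublist (List.drop_sublist _ _)
      rw [ih (t.drop m.toNat).length (by simp only [List.length_drop]; omega) _ rfl hdp]
      rw [bsum_peel m hm t hlen]
      have hmin := min_take_desc t hp m.toNat h1 hm'
      have hml : m.toNat - 1 < t.length := by omega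
      have hget : PySem.List.pyGetD t (m - 1) 0 = t[m.toNat - 1] := by
        rw [PySem.List.pyGetD_eq_getElem t 0 (by omega) (by push_cast; omega)]
        congr 1
        omega
      simp only [List.nil_append]
      rw [hmin, hget]
      ring

theorem neg_case (m : Int) (hm : m < 0) (t : List Int) (p : Int) (a : List Int) :
    (t.foldl (stepA m) (a, p)).2 = p := by
  induction t generalizing a p with
  | nil => simp
  | cons x tl ih =>
    simp only [List.foldl_cons, stepA]
    rw [if_neg (by simp; omega)]
    exact ih _ _

-- ===== VERDICT (by name: the statement is the Claim_ definition above) =====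
theorem solution_spec : Claim_equal_solution := by
  intro k m score _ hpre
  unfold Spec_solution solution solution_alt
  simp only []
  set t := PySem.List.sorted score (fun y => y) true with ht
  have hp : t.Pairwise (fun a b => b ≤ a) := PySem.List.sorted_pairwise_rev score (fun y => y)
  rw [PySem.List.foldl_pyRange_zero_pyGetD' t 0 (stepA m) ([], 0)]
  have hne : m ≠ 0 := hpre
  by_cases hm : m < 0
  · rw [neg_case m hm t 0 []]
    have hq : PySem.Int.floordiv (t.length : Int) m ≤ 0 := by
      have h1 : PySem.Int.floordiv (-(t.length : Int)) (-m) < 1 :=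
        (PySem.Int.floordiv_lt_iff_lt_mul (by omega)).mpr (by omega)
      have h2 := PySem.Int.floordiv_neg_neg (t.length : Int) m
      omega
    rw [PySem.List.pyRange_one_eq_nil hq]
    simp
  · have hm1 : 1 ≤ m := by omega
    rw [main_lemma m hm1 t.length t rfl hp 0]
    simp [bsum]
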